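-- pv_equiv track=rewrite | github.com/strange-loop-syndicate/plugins | plugins/deep-research/scripts/md_to_html.py | _convert_paragraphs
-- ===== SOURCE A (Python) =====
-- def _convert_paragraphs(html: str) -> str:
--     """Wrap non-HTML lines in paragraph tags"""
--     lines = html.split('\n')
--     result = []
--     in_paragraph = False
--
--     for line in lines:
--         stripped = line.strip()
--
--         # Skip empty lines
--         if not stripped:
--             if in_paragraph:
--                 result.append('</p>')
--                 in_paragraph = False
--             result.append(line)
--             continue
--
--         # Skip lines that are already HTML tags or special elements
--         if (stripped.startswith('<') and stripped.endswith('>')) or \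
--            stripped.startswith('</') or \
--            '<h' in stripped or '<div' in stripped or '<ul' in stripped or \
--            '<ol' in stripped or '<li' in stripped or '<table' in stripped or \
--            '</div>' in stripped or '</ul>' in stripped or '</ol>' in stripped or \
--            '<pre>' in stripped or '<blockquote>' in stripped or \
--            stripped.startswith('<!--CODEBLOCK_'):
--             if in_paragraph:
--                 result.append('</p>')
--                 in_paragraph = False
--             result.append(line)
--             continue
--
--         # Regular text line - wrap in paragraph
--         if not in_paragraph:
--             result.append('<p>' + line)
--             in_paragraph = True
--         else:
--             result.append(line)
--
--     if in_paragraph: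
--         result.append('</p>')
--
--     return '\n'.join(result)
-- ===== SOURCE B (Python) =====
-- def _is_special(stripped: str) -> bool:
--     return (stripped.startswith('<') and stripped.endswith('>')) or \
--         stripped.startswith('</') or \
--         '<h' in stripped or '<div' in stripped or '<ul' in stripped or \
--         '<ol' in stripped or '<li' in stripped or '<table' in stripped or \
--         '</div>' in stripped or '</ul>' in stripped or '</ol>' in stripped or \
--         '<pre>' in stripped or '<blockquote>' in stripped or \
--         stripped.startswith('<!--CODEBLOCK_')
--
--
-- def _is_text(line: str) -> bool:
--     stripped = line.strip()
--     return stripped != '' and not _is_special(stripped)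
--
--
-- def _flush(run: list) -> list:
--     if not run:
--         return []
--     return ['<p>' + run[0]] + run[1:] + ['</p>']
--
--
-- def _convert_paragraphs(html: str) -> str:
--     """Wrap non-HTML lines in paragraph tags"""
--     out = []
--     run = []
--     for line in html.split('\n'):
--         if _is_text(line):
--             run.append(line)
--         else:
--             out.extend(_flush(run))
--             run = []
--             out.append(line)
--     return '\n'.join(out + _flush(run))
-- ===== Notes on version B (the rewrite author's own statement) =====
-- stated objective: alternative
-- what changed: Replaced A's carried in_paragraph boolean with run accumulation: B collects maximal runs of consecutive regular-text lines and flushes each completed run wrapped in an opening tag on its first line and a closing tag afterwards, emitting blank/HTML lines verbatim between runs.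
import Mathlib
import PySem

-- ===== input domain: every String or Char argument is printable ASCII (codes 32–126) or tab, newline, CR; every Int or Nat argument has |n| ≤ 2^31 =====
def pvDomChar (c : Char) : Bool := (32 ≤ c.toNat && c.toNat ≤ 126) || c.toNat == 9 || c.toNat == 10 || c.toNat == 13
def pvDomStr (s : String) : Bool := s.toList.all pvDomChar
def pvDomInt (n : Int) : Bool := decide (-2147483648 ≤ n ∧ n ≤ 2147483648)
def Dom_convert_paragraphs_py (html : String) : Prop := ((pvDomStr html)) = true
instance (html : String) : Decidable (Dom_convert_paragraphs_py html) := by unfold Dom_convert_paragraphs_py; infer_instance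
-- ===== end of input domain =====

-- B replaces A's carried in_paragraph flag by accumulating maximal runs of text lines and
-- flushing each completed run as one wrapped paragraph block (objective: alternative decomposition).

-- ===== PORT A =====
-- the HTML/special-line test of A, applied to the stripped line (shared text with B's classifier)
def pvSpecial (stripped : String) : Bool :=
  (PySem.Str.startswith stripped "<" && PySem.Str.endswith stripped ">") ||
  PySem.Str.startswith stripped "</" ||
  PySem.Str.isIn "<h" stripped || PySem.Str.isIn "<div" stripped || PySem.Str.isIn "<ul" stripped ||
  PySem.Str.isIn "<ol" stripped || PySem.Str.isIn "<li" stripped || PySem.Str.isIn "<table" stripped ||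
  PySem.Str.isIn "</div>" stripped || PySem.Str.isIn "</ul>" stripped || PySem.Str.isIn "</ol>" stripped ||
  PySem.Str.isIn "<pre>" stripped || PySem.Str.isIn "<blockquote>" stripped ||
  PySem.Str.startswith stripped "<!--CODEBLOCK_"

-- A's loop body: state = (result, in_paragraph)
def pvStepA (st : List String × Bool) (line : String) : List String × Bool :=
  let stripped := PySem.Str.strip line
  if stripped == "" then
    ((if st.2 then st.1 ++ ["</p>"] else st.1) ++ [line], false)
  else if pvSpecial stripped then
    ((if st.2 then st.1 ++ ["</p>"] else st.1) ++ [line], false)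
  else if !st.2 then
    (st.1 ++ ["<p>" ++ line], true)
  else
    (st.1 ++ [line], st.2)

def convert_paragraphs_py (html : String) : String :=
  let lines := (PySem.Str.split? html "\n").getD []
  let st := lines.foldl pvStepA ([], false)
  let result := if st.2 then st.1 ++ ["</p>"] else st.1
  PySem.Str.join "\n" result

-- ===== PORT B =====
def pvIsText (line : String) : Bool :=
  let stripped := PySem.Str.strip line
  !(stripped == "") && !pvSpecial stripped

-- emit a completed run of text lines wrapped in a paragraph
def pvFlush (run : List String) : List String :=
  match run with
  | [] => []
  | r :: rs => ("<p>" ++ r) :: rs ++ ["</p>"]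

-- B's loop body: state = (out, current run of text lines)
def pvStepB (st : List String × List String) (line : String) : List String × List String :=
  if pvIsText line then (st.1, st.2 ++ [line])
  else (st.1 ++ pvFlush st.2 ++ [line], [])

def convert_paragraphs_py_alt (html : String) : String :=
  let lines := (PySem.Str.split? html "\n").getD []
  let st := lines.foldl pvStepB ([], [])
  PySem.Str.join "\n" (st.1 ++ pvFlush st.2)

-- ===== PRECONDITION & SPEC =====
def Spec_convert_paragraphs_py (html : String) (out : String) : Prop := out = convert_paragraphs_py_alt html
instance (html : String) (out : String) : Decidable (Spec_convert_paragraphs_py html out) := by unfold Spec_convert_paragraphs_py; infer_instance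

-- ===== CLAIM (what is proved, stated in full; the proofs are below) =====
def Claim_equal_convert_paragraphs_py : Prop := ∀ (html : String), Dom_convert_paragraphs_py html → Spec_convert_paragraphs_py html (convert_paragraphs_py html)

-- ===== LEMMAS AND PROOFS =====

-- the lines of a run that A has already emitted while in_paragraph is still true
def pvOpen (run : List String) : List String :=
  match run with
  | [] => []
  | r :: rs => ("<p>" ++ r) :: rs

lemma pvLoopInv (lines : List String) (out run : List String) :
    (let sa := lines.foldl pvStepA (out ++ pvOpen run, !run.isEmpty)
     if sa.2 then sa.1 ++ ["</p>"] else sa.1)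
    = (let sb := lines.foldl pvStepB (out, run)
       sb.1 ++ pvFlush sb.2) := by
  induction lines generalizing out run with
  | nil =>
      cases run with
      | nil => simp [pvOpen, pvFlush]
      | cons r rs => simp [pvOpen, pvFlush]
  | cons line rest ih =>
      simp only [List.foldl_cons]
      by_cases h1 : PySem.Str.strip line == ""
      · have hA : pvStepA (out ++ pvOpen run, !run.isEmpty) line
            = (out ++ pvFlush run ++ [line], false) := by
          cases run with
          | nil => simp [pvStepA, pvOpen, pvFlush, h1]
          | cons r rs => simp [pvStepA, pvOpen, pvFlush, h1]
        have hB : pvStepB (out, run) line = (out ++ pvFlush run ++ [line], []) := by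
          simp [pvStepB, pvIsText, h1]
        rw [hA, hB]
        have := ih (out ++ pvFlush run ++ [line]) []
        simpa [pvOpen, pvFlush] using this
      · by_cases h2 : pvSpecial (PySem.Str.strip line)
        · have hA : pvStepA (out ++ pvOpen run, !run.isEmpty) line
              = (out ++ pvFlush run ++ [line], false) := by
            cases run with
            | nil => simp [pvStepA, pvOpen, pvFlush, h1, h2]
            | cons r rs => simp [pvStepA, pvOpen, pvFlush, h1, h2]
          have hB : pvStepB (out, run) line = (out ++ pvFlush run ++ [line], []) := by
            simp [pvStepB, pvIsText, h1, h2]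
          rw [hA, hB]
          have := ih (out ++ pvFlush run ++ [line]) []
          simpa [pvOpen, pvFlush] using this
        · have hB : pvStepB (out, run) line = (out, run ++ [line]) := by
            simp [pvStepB, pvIsText, h1, h2]
          rw [hB]
          cases run with
          | nil =>
              have hA : pvStepA (out ++ pvOpen [], !([] : List String).isEmpty) line
                  = (out ++ pvOpen [line], !([line]).isEmpty) := by
                simp [pvStepA, pvOpen, h1, h2]
              rw [hA]
              exact ih out [line]
          | cons r rs =>
              have hA : pvStepA (out ++ pvOpen (r :: rs), !(r :: rs).isEmpty) line
                  = (out ++ pvOpen (r :: rs ++ [line]), !(r :: rs ++ [line]).isEmpty) := by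
                simp [pvStepA, pvOpen, h1, h2]
              rw [hA]
              exact ih out (r :: rs ++ [line])

-- ===== VERDICT (by name: the statement is the Claim_ definition above) =====
theorem convert_paragraphs_py_spec : Claim_equal_convert_paragraphs_py := by
  intro html _
  unfold Spec_convert_paragraphs_py convert_paragraphs_py convert_paragraphs_py_alt
  have := pvLoopInv ((PySem.Str.split? html "\n").getD []) [] []
  simp only [pvOpen, List.append_nil, List.isEmpty_nil, Bool.not_true] at this
  simp only []
  rw [this]
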